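-- pv_equiv track=rewrite | github.com/pingusdelingus/projectEuler | solutions/problem893/sol.py | repToMatches
-- ===== SOURCE A (Python) =====
-- digitToMatches = {1 : 2, 2 : 5, 3 : 5, 4 : 4, 5 : 5, 6 : 6, 7 : 3, 8 : 7, 9 : 6, 0 : 6, "+" : 2, "*" : 2}
--
-- def repToMatches(str1):
--     seenReps = {}
--     if str1 in seenReps:
--         return seenReps[str1]
--     else:
--         numMatches = 0
--         for char in str1:
--             if char == "*" or char == "+":
--                 numMatches += 2
--             else:
--                 char = int(char)
--                 numMatches += digitToMatches[char]
--         seenReps[str1] = numMatches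
--         return numMatches
-- ===== SOURCE B (Python) =====
-- digitToMatches = {1 : 2, 2 : 5, 3 : 5, 4 : 4, 5 : 5, 6 : 6, 7 : 3, 8 : 7, 9 : 6, 0 : 6, "+" : 2, "*" : 2}
--
-- def repToMatches(str1):
--     # Divide and conquer: a single symbol is looked up directly, a longer
--     # representation is split in half and the two halves' counts are added.
--     n = len(str1)
--     if n == 0:
--         return 0
--     if n == 1:
--         if str1 == "+" or str1 == "*":
--             return 2
--         return digitToMatches[int(str1)]
--     mid = n // 2
--     return repToMatches(str1[:mid]) + repToMatches(str1[mid:])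
-- ===== Notes on version B (the rewrite author's own statement) =====
-- stated objective: alternative
-- what changed: B replaces A's left-to-right accumulator loop by a divide-and-conquer recursion: a single symbol is weighted directly, a longer string is split at its midpoint and the two halves' match counts are added (A's dead seenReps cache is dropped).
import Mathlib
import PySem

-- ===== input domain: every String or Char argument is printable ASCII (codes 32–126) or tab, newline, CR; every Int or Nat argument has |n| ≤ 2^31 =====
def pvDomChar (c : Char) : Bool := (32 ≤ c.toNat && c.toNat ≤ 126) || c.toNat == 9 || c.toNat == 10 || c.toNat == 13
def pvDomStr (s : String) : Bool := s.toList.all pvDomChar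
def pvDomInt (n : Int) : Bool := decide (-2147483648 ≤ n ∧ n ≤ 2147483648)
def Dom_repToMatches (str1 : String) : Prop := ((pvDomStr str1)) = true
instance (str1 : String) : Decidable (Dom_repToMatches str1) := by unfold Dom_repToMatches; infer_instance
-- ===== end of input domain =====

-- B replaces A's left-to-right accumulator loop by a divide-and-conquer recursion over the two
-- halves of the string (same asymptotic cost); A's dead seenReps cache is dropped.

-- ===== PORT A =====
-- the module constant; the string keys "+"/"*" are unreachable (guarded by the branch before the
-- lookup) and omitted because a Lean Dict is homogeneous.
def digitToMatchesD : PySem.Dict Int Int :=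
  PySem.Dict.ofList [(1, 2), (2, 5), (3, 5), (4, 4), (5, 5), (6, 6), (7, 3), (8, 7), (9, 6), (0, 6)]

-- literal port of A: seenReps is freshly empty, so 'str1 in seenReps' is always False and the else
-- branch runs.  '.getD 0' stands exactly where Python raises ValueError/KeyError (excluded by Pre_).
def repToMatches (str1 : String) : Int :=
  str1.toList.foldl
    (fun numMatches char =>
      if char = '*' ∨ char = '+' then numMatches + 2
      else numMatches + ((PySem.Int.ofChars? [char]).bind (fun n => digitToMatchesD.get? n)).getD 0)
    0

-- ===== PORT B =====
-- Source B's recursion, over the string's character list; str1[:mid] / str1[mid:] are PySem slices.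
-- '.getD 0' again stands exactly where Python raises ValueError/KeyError (excluded by Pre_).
-- midpoint arithmetic cited by pvAltGo's termination proof
lemma pvMid (n : Nat) : PySem.Int.floordiv (n : Int) 2 = ((n / 2 : Nat) : Int) := by
  exact_mod_cast PySem.Int.floordiv_natCast n 2

def pvAltGo (l : List Char) : Int :=
  if h0 : l.length = 0 then 0
  else if h1 : l.length = 1 then
    if l = ['+'] ∨ l = ['*'] then 2
    else ((PySem.Int.ofChars? l).bind (fun n => digitToMatchesD.get? n)).getD 0
  else
    pvAltGo (PySem.List.slice l none (some (PySem.Int.floordiv (l.length : Int) 2)))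
      + pvAltGo (PySem.List.slice l (some (PySem.Int.floordiv (l.length : Int) 2)) none)
termination_by l.length
decreasing_by
  · rw [pvMid, PySem.List.slice_to_natCast]
    simp only [List.length_take]
    omega
  · rw [pvMid, PySem.List.slice_from_natCast]
    simp only [List.length_drop]
    omega

def repToMatches_alt (str1 : String) : Int := pvAltGo str1.toList

-- ===== PRECONDITION & SPEC =====
-- Pre_ excludes exactly the inputs where Python A raises ValueError/KeyError: a character that is
-- neither an ASCII digit nor '+' nor '*'.
def Pre_repToMatches (str1 : String) : Prop :=
  str1.toList.all (fun c => c.isDigit || c == '+' || c == '*') = true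
instance (str1 : String) : Decidable (Pre_repToMatches str1) := by unfold Pre_repToMatches; infer_instance
def pvWitness_repToMatches : String := "17+2*3"

def Spec_repToMatches (str1 : String) (out : Int) : Prop := out = repToMatches_alt str1
instance (str1 : String) (out : Int) : Decidable (Spec_repToMatches str1 out) := by unfold Spec_repToMatches; infer_instance

-- ===== CLAIM (what is proved, stated in full; the proofs are below) =====
def Claim_equal_repToMatches : Prop := ∀ (str1 : String), Dom_repToMatches str1 → Pre_repToMatches str1 → Spec_repToMatches str1 (repToMatches str1)

-- ===== LEMMAS AND PROOFS =====

-- the per-character matchstick weight A's loop body adds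
def pvW (c : Char) : Int :=
  if c = '*' ∨ c = '+' then 2
  else ((PySem.Int.ofChars? [c]).bind (fun n => digitToMatchesD.get? n)).getD 0

lemma pvA_eq (str1 : String) :
    repToMatches str1 = (str1.toList.map pvW).sum := by
  unfold repToMatches
  calc str1.toList.foldl
        (fun numMatches char =>
          if char = '*' ∨ char = '+' then numMatches + 2
          else numMatches + ((PySem.Int.ofChars? [char]).bind (fun n => digitToMatchesD.get? n)).getD 0) 0
      = str1.toList.foldl (fun acc c => acc + pvW c) 0 := by
        apply PySem.List.foldl_congr_mem
        intro acc c _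
        unfold pvW; split_ifs <;> rfl
    _ = (str1.toList.map pvW).sum := by rw [PySem.List.foldl_add]; simp

lemma pvAltGo_eq (l : List Char) : pvAltGo l = (l.map pvW).sum := by
  induction l using pvAltGo.induct with
  | case1 l h0 =>
    rw [pvAltGo]
    simp [List.length_eq_zero_iff.mp h0]
  | case2 l h0 h1 hop =>
    obtain ⟨c, rfl⟩ := List.length_eq_one_iff.mp h1
    rw [pvAltGo]
    simp only [List.length_cons, List.length_nil]
    rw [dif_neg (by omega), dif_pos trivial, if_pos hop]
    rcases hop with h | h <;> · rw [List.cons.injEq] at h; simp [pvW, h.1]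
  | case3 l h0 h1 hop =>
    obtain ⟨c, rfl⟩ := List.length_eq_one_iff.mp h1
    rw [pvAltGo]
    simp only [List.length_cons, List.length_nil]
    rw [dif_neg (by omega), dif_pos trivial, if_neg hop]
    have hp : c ≠ '+' := fun h => hop (Or.inl (by rw [h]))
    have hs : c ≠ '*' := fun h => hop (Or.inr (by rw [h]))
    simp [pvW, hp, hs]
  | case4 l h0 h1 ih1 ih2 =>
    rw [pvAltGo]
    simp only [dif_neg h0, dif_neg h1]
    rw [ih1, ih2, pvMid, PySem.List.slice_to_natCast, PySem.List.slice_from_natCast,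
      ← List.sum_append, ← List.map_append, List.take_append_drop]

-- ===== VERDICT (by name: the statement is the Claim_ definition above) =====
theorem repToMatches_spec : Claim_equal_repToMatches := by
  intro str1 _ _
  unfold Spec_repToMatches repToMatches_alt
  rw [pvA_eq, pvAltGo_eq]
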